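-- pv_equiv track=rewrite | github.com/t17637881835-droid/hygon-ops | skills/haiguang-ops/tools/vector_search.py | _deduplicate_by_question
-- ===== SOURCE A (Python) =====
-- from typing import List, Dict, Optional, Tuple
--
-- def _deduplicate_by_question(items: List[Dict]) -> List[Dict]:
--     """按 question 去重，优先保留 md 版本（_source_file 存在的）"""
--     question_map = {}
--     for item in items:
--         q = item.get("question", "").strip()
--         if not q:
--             continue
--         if q not in question_map:
--             question_map[q] = item
--         else:
--             # 优先保留 md 版本（有 _source_file 字段）
--             existing = question_map[q]
--             if item.get("_source_file") and not existing.get("_source_file"):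
--                 question_map[q] = item
--     return list(question_map.values())
-- ===== SOURCE B (Python) =====
-- def _deduplicate_by_question(items):
--     """Group items by stripped question first, then pick one item per group."""
--     groups = {}
--     for item in items:
--         q = item.get("question", "").strip()
--         if not q:
--             continue
--         groups.setdefault(q, []).append(item)
--     result = []
--     for group in groups.values():
--         first = group[0]
--         if first.get("_source_file"):
--             result.append(first)
--         else:
--             result.append(next((it for it in group if it.get("_source_file")), first))
--     return result
-- ===== Notes on version B (the rewrite author's own statement) =====
-- stated objective: alternative
-- what changed: A selects the kept item on the fly while building one dict (conditionally overwriting an entry); B first groups all items into lists per question, then selects the representative of each group in a separate pass.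
import Mathlib
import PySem

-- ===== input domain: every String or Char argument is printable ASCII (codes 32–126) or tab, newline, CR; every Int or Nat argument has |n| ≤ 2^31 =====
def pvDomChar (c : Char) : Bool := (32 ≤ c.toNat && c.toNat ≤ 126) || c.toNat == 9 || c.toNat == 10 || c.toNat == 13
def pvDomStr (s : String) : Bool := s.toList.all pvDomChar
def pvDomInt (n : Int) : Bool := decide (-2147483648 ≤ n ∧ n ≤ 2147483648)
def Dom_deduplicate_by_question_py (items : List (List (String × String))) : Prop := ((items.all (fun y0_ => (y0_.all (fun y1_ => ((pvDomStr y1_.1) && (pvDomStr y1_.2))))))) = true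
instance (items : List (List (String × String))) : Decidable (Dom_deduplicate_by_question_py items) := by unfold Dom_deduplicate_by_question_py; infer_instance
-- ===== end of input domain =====

-- B groups items per question first and selects each group's representative in a second pass,
-- instead of A's single pass that conditionally overwrites one dict entry (alternative decomposition, same cost).


-- item.get(key, "") : first-match lookup in the association list
def pvGetStr (item : List (String × String)) (k : String) : String :=
  (PySem.Dict.mk item).getD k ""

-- item.get("question", "").strip()
def pvQ (item : List (String × String)) : String :=
  PySem.Str.strip (pvGetStr item "question")

-- truthiness of item.get("_source_file") (a string under the type convention: truthy = non-empty)
def pvSrc (item : List (String × String)) : Bool :=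
  pvGetStr item "_source_file" ≠ ""

-- ===== PORT A =====
-- single pass: keep the first item per question, overwrite it by a later md item
-- only when the kept one is not md
def deduplicate_by_question_py (items : List (List (String × String))) : List (List (String × String)) :=
  (items.foldl
    (fun (qm : PySem.Dict String (List (String × String))) item =>
      let q := pvQ item
      if q = "" then qm
      else if qm.contains q = false then qm.insert q item
      else
        let existing := qm.getD q []
        if pvSrc item && !pvSrc existing then qm.insert q item else qm)
    PySem.Dict.empty).values

-- ===== PORT B =====
-- pick a group's representative: its first item if md, else its first md item, else its first item
def pvSelect (g : List (List (String × String))) : List (String × String) :=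
  match g with
  | [] => []
  | first :: _ =>
    if pvSrc first then first
    else match g.find? pvSrc with
      | some it => it
      | none => first

-- two passes: group all items by question, then select one representative per group
def deduplicate_by_question_py_alt (items : List (List (String × String))) : List (List (String × String)) :=
  let groups := items.foldl
    (fun (d : PySem.Dict String (List (List (String × String)))) item =>
      let q := pvQ item
      if q = "" then d
      else d.modify q [] (· ++ [item]))
    PySem.Dict.empty
  groups.values.map pvSelect

-- ===== PRECONDITION & SPEC =====
def Spec_deduplicate_by_question_py (items : List (List (String × String))) (out : List (List (String × String))) : Prop := out = deduplicate_by_question_py_alt items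
instance (items : List (List (String × String))) (out : List (List (String × String))) : Decidable (Spec_deduplicate_by_question_py items out) := by unfold Spec_deduplicate_by_question_py; infer_instance

-- ===== CLAIM (what is proved, stated in full; the proofs are below) =====
def Claim_equal_deduplicate_by_question_py : Prop := ∀ (items : List (List (String × String))), Dom_deduplicate_by_question_py items → Spec_deduplicate_by_question_py items (deduplicate_by_question_py items)

-- ===== LEMMAS AND PROOFS =====

-- the invariant tying A's dict to B's dict of groups
def pvInv (d : PySem.Dict String (List (String × String)))
    (g : PySem.Dict String (List (List (String × String)))) : Prop :=
  d.items = g.items.map (fun p => (p.1, pvSelect p.2)) ∧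
  g.keys.Nodup ∧
  ∀ p ∈ g.items, p.2 ≠ []

theorem pvSelect_append (gq : List (List (String × String))) (hne : gq ≠ []) (item : List (String × String)) :
    pvSelect (gq ++ [item]) =
      if pvSrc item && !pvSrc (pvSelect gq) then item else pvSelect gq := by
  obtain ⟨first, rest, rfl⟩ : ∃ a l, gq = a :: l := by
    cases gq with | nil => exact absurd rfl hne | cons a l => exact ⟨a, l, rfl⟩
  by_cases hf : pvSrc first
  · simp [pvSelect, hf]
  · have hfc : List.find? pvSrc (first :: rest) = List.find? pvSrc rest := by
      simp [List.find?, hf]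
    have hfc2 : List.find? pvSrc (first :: (rest ++ [item]))
        = (List.find? pvSrc rest).or (List.find? pvSrc [item]) := by
      simp [List.find?, hf, List.find?_append]
    simp only [pvSelect, List.cons_append]
    rw [hfc2, hfc]
    cases hr : List.find? pvSrc rest with
    | some it =>
      have hit : pvSrc it = true := List.find?_some hr
      simp [Option.or, hf, hit]
    | none =>
      by_cases hi : pvSrc item <;> simp [List.find?, hi, hf, Option.or]

theorem pvInv_step (d : PySem.Dict String (List (String × String)))
    (g : PySem.Dict String (List (List (String × String)))) (item : List (String × String))
    (h : pvInv d g) :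
    pvInv
      (let q := pvQ item
       if q = "" then d
       else if d.contains q = false then d.insert q item
       else
         let existing := d.getD q []
         if pvSrc item && !pvSrc existing then d.insert q item else d)
      (let q := pvQ item
       if q = "" then g
       else g.modify q [] (· ++ [item])) := by
  obtain ⟨hitems, hnd, hne⟩ := h
  by_cases hq : pvQ item = ""
  · simpa [hq] using ⟨hitems, hnd, hne⟩
  have hkeys : d.keys = g.keys := by
    simp [PySem.Dict.keys, hitems, List.map_map, Function.comp]
  have hcontains : d.contains (pvQ item) = g.contains (pvQ item) := by
    rw [PySem.Dict.contains_eq_decide_mem_keys, PySem.Dict.contains_eq_decide_mem_keys, hkeys]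
  have hdnd : d.keys.Nodup := hkeys ▸ hnd
  have hmod : g.modify (pvQ item) [] (· ++ [item])
      = g.insert (pvQ item) (g.getD (pvQ item) [] ++ [item]) := rfl
  by_cases hc : g.contains (pvQ item) = true
  · -- existing question: A conditionally overwrites, B appends to the group
    obtain ⟨gq, hget⟩ : ∃ v, g.get? (pvQ item) = some v := by
      have := PySem.Dict.contains_eq_isSome_get? g (pvQ item)
      rw [hc] at this
      exact Option.isSome_iff_exists.mp this.symm
    have hgq : g.getD (pvQ item) [] = gq := PySem.Dict.getD_of_get?_eq_some g [] hget
    have hmemg : (pvQ item, gq) ∈ g.items :=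
      (PySem.Dict.get?_eq_some_iff_mem_items g _ _ hnd).mp hget
    have hgqne : gq ≠ [] := hne _ hmemg
    have hmemd : (pvQ item, pvSelect gq) ∈ d.items := by
      rw [hitems]; exact List.mem_map.mpr ⟨_, hmemg, rfl⟩
    have hdget : d.getD (pvQ item) [] = pvSelect gq :=
      PySem.Dict.getD_of_get?_eq_some d []
        ((PySem.Dict.get?_eq_some_iff_mem_items d _ _ hdnd).mpr hmemd)
    have hsel := pvSelect_append gq hgqne item
    -- any group entry with this key IS (pvQ item, gq)
    have huniq : ∀ p ∈ g.items, p.1 = pvQ item → p = (pvQ item, gq) := by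
      intro p hp hp1
      have h1 : g.get? p.1 = some p.2 :=
        (PySem.Dict.get?_eq_some_iff_mem_items g _ _ hnd).mpr hp
      rw [hp1, hget] at h1
      exact Prod.ext hp1 (Option.some.inj h1).symm
    simp only [hq, if_false, hcontains, hc, Bool.true_eq_false, if_false, hdget, hmod, hgq]
    by_cases hcond : (pvSrc item && !pvSrc (pvSelect gq)) = true
    · rw [hcond, if_pos rfl]
      refine ⟨?_, ?_, ?_⟩
      · rw [PySem.Dict.items_insert_of_contains d item (hcontains.trans hc),
          PySem.Dict.items_insert_of_contains g _ hc, hitems, List.map_map, List.map_map]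
        refine List.map_congr_left (fun p _ => ?_)
        by_cases hp1 : p.1 = pvQ item <;>
          simp [Function.comp, hp1, hsel, hcond]
      · rw [PySem.Dict.keys_insert_of_contains g _ hc]; exact hnd
      · intro p hp
        rcases (PySem.Dict.mem_items_insert g _ _ p).mp hp with rfl | ⟨hp, -⟩
        · simp
        · exact hne p hp
    · rw [if_neg hcond]
      refine ⟨?_, ?_, ?_⟩
      · rw [PySem.Dict.items_insert_of_contains g _ hc, hitems, List.map_map]
        refine List.map_congr_left (fun p hp => ?_)
        by_cases hp1 : p.1 = pvQ item
        · have := huniq p hp hp1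
          subst this
          simp only [Function.comp, beq_self_eq_true, if_pos]
          rw [hsel, if_neg hcond]
        · simp [Function.comp, hp1]
      · rw [PySem.Dict.keys_insert_of_contains g _ hc]; exact hnd
      · intro p hp
        rcases (PySem.Dict.mem_items_insert g _ _ p).mp hp with rfl | ⟨hp, -⟩
        · simp
        · exact hne p hp
  · -- fresh question: both append a new entry
    have hc' : g.contains (pvQ item) = false := by simpa using hc
    have hdc : d.contains (pvQ item) = false := hcontains.trans hc'
    simp only [hq, if_false, hdc, if_true, hmod,
      PySem.Dict.getD_of_not_contains g [] hc', List.nil_append]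
    refine ⟨?_, ?_, ?_⟩
    · rw [PySem.Dict.items_insert_of_not_contains d item hdc,
        PySem.Dict.items_insert_of_not_contains g [item] hc', hitems, List.map_append]
      have : pvSelect [item] = item := by
        by_cases hi : pvSrc item <;> simp [pvSelect, List.find?, hi]
      simp only [List.map_cons, List.map_nil, this]
    · rw [PySem.Dict.keys_insert_of_not_contains g [item] hc']
      have hqmem : pvQ item ∉ g.keys := by
        have := PySem.Dict.contains_eq_decide_mem_keys g (pvQ item)
        rw [hc'] at this
        simpa using this.symm
      simp only [List.nodup_append, List.nodup_singleton]
      refine ⟨hnd, trivial, ?_⟩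
      intro a ha b hb heq
      rw [List.mem_singleton] at hb
      subst hb
      exact hqmem (heq ▸ ha)
    · intro p hp
      rcases (PySem.Dict.mem_items_insert g _ _ p).mp hp with rfl | ⟨hp, -⟩
      · simp
      · exact hne p hp

theorem pvInv_fold (items : List (List (String × String)))
    (d : PySem.Dict String (List (String × String)))
    (g : PySem.Dict String (List (List (String × String)))) (h : pvInv d g) :
    pvInv
      (items.foldl (fun qm item =>
        let q := pvQ item
        if q = "" then qm
        else if qm.contains q = false then qm.insert q item
        else
          let existing := qm.getD q []
          if pvSrc item && !pvSrc existing then qm.insert q item else qm) d)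
      (items.foldl (fun d item =>
        let q := pvQ item
        if q = "" then d
        else d.modify q [] (· ++ [item])) g) := by
  induction items generalizing d g with
  | nil => exact h
  | cons x xs ih => exact ih _ _ (pvInv_step d g x h)

-- ===== VERDICT (by name: the statement is the Claim_ definition above) =====
theorem deduplicate_by_question_py_spec : Claim_equal_deduplicate_by_question_py := by
  intro items _
  unfold Spec_deduplicate_by_question_py deduplicate_by_question_py deduplicate_by_question_py_alt
  have h := pvInv_fold items PySem.Dict.empty PySem.Dict.empty
    ⟨rfl, by simp [PySem.Dict.keys, PySem.Dict.empty], by simp [PySem.Dict.empty]⟩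
  obtain ⟨heq, -, -⟩ := h
  simp only [PySem.Dict.values, heq, List.map_map]
  rfl
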